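-- pv_equiv track=rewrite | github.com/jordanbell2357/continued_fractions | prime_numbers.py | kronecker_symbol
-- ===== SOURCE A (Python) =====
-- import math
-- import itertools as it
-- from collections import Counter
-- from collections import abc
--
-- def isprime(n: int) -> bool:
--     n = abs(n)
--     if n % 2 == 0:
--         if n == 2:
--             return True
--         else:
--             return False
--     else:
--         for k in range(3, math.isqrt(n) + 1, 2):
--             if n % k == 0:
--                 return False
--         return True
--
-- def generate_primes() -> abc.Generator[int]:
--     yield 2
--     for k in it.count(start=3, step=2):
--         if isprime(k):
--             yield k
--
-- def make_prime_factor_counter(n: int) -> Counter: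
--     prime_gen = generate_primes()
--     prime_factor_counter = Counter()
--     for p in prime_gen:
--         if n in [0, 1]:
--             break
--         while n % p == 0:
--             prime_factor_counter.update([p])
--             n = n // p
--     return prime_factor_counter
--
-- def legendre_symbol(a: int, p: int) -> int:
--     """
--     We extend the usual Legendre symbol to include p=2,
--     following the extension by the Kronecker symbol.
--     """
--     if not isprime(p):
--         raise ValueError(f"p must be prime: {p=}")
--     if p == 2:
--         r = a % 8
--         if r in [0, 2, 4, 6]:
--             return 0
--         elif r in [1, 7]:
--             return 1
--         elif r in [3, 5]:
--             return -1
--     if a % p == 0: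
--         return 0
--     if any((a - x ** 2) % p == 0 for x in range(1, p)):
--         return 1
--     else:
--         return -1
--
-- def kronecker_symbol(a: int, n: int) -> int:
--     """
--     Henri Cohen, A Course in Computation Algebraic Number Theory, Graduate Texts in Mathematics, Volume 138, Springer, 1996.
--     Definition 1.4.8, p. 28,
--     """
--     if n == 0:
--         return 1 if a in [-1, 1] else 0
--     elif n == -1:
--         return -1 if a < 0 else 1
--     elif n == 1:
--         return 1
--
--     u = n // abs(n)
--     n = n // u
--     prime_factor_counter_n  = make_prime_factor_counter(n)
--     legendre_symbol_product_n = math.prod(legendre_symbol(a, p) ** v for p, v in prime_factor_counter_n.items())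
--     return kronecker_symbol(a, u) * legendre_symbol_product_n
-- ===== SOURCE B (Python) =====
-- def kronecker_symbol(a: int, n: int) -> int:
--     # Iterative: handle sign of n, strip factors of 2 via the (a/2) table,
--     # then trial-divide the odd part, scoring each prime factor with the
--     # Legendre symbol computed by Euler's criterion (one modular power).
--     if n == 0:
--         return 1 if a in (-1, 1) else 0
--     result = 1
--     if n < 0:
--         n = -n
--         if a < 0:
--             result = -1
--     while n % 2 == 0:
--         n //= 2
--         r = a % 8
--         if r in (0, 2, 4, 6):
--             result = 0
--         elif r in (3, 5):
--             result = -result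
--     d = 3
--     while d * d <= n:
--         while n % d == 0:
--             n //= d
--             result *= _legendre_euler(a, d)
--         d += 2
--     if n > 1:
--         result *= _legendre_euler(a, n)
--     return result
--
--
-- def _legendre_euler(a: int, p: int) -> int:
--     # Legendre symbol (a/p) for an odd prime p, by Euler's criterion.
--     if a % p == 0:
--         return 0
--     return 1 if pow(a, (p - 1) // 2, p) == 1 else -1
-- ===== Notes on version B (the rewrite author's own statement) =====
-- stated objective: faster
-- what changed: Replaces A's prime generator (an isprime trial-division test per odd candidate), Counter bookkeeping, recursion on the sign, and O(p)-residue-scan Legendre symbol by a single iterative trial division of |n| (factor 2 and the sign handled up front, no primality tests) with each prime factor scored by Euler's criterion pow(a,(p-1)//2,p).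
import Mathlib
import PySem

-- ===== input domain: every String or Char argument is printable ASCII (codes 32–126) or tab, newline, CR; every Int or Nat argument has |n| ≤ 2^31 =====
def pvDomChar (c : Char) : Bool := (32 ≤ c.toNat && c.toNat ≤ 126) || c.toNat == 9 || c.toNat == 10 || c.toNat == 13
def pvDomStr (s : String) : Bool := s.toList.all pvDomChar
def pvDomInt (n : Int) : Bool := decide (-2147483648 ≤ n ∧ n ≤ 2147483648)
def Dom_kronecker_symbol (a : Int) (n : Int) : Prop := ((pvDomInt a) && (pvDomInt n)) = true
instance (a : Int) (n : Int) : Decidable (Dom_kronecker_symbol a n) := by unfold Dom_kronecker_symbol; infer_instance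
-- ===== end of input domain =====

-- B replaces A's prime generator + Counter + recursion + O(p) residue scan by one
-- iterative trial division with Euler's-criterion Legendre symbols (pow(a,(p-1)//2,p)).

-- ===== PORT A =====

-- isprime: trial division by odd k up to isqrt(n)
def pvIsprime (n : Int) : Bool :=
  let n := |n|
  if PySem.Int.mod n 2 == 0 then n == 2
  else (PySem.List.pyRange 3 ((n.toNat.sqrt : Int) + 1) 2).all (fun k => !(PySem.Int.mod n k == 0))

-- `while n % p == 0: counter.update([p]); n = n // p` (fuel makes the while-loop total;
-- fuel = n.toNat is sufficient, proved below)
def pvDivLoop (p : Int) : Nat → Int → PySem.Dict Int Nat → Int × PySem.Dict Int Nat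
  | 0, n, c => (n, c)
  | fuel + 1, n, c =>
    if PySem.Int.mod n p == 0 then
      pvDivLoop p fuel (PySem.Int.floordiv n p) (c.modify p 0 (· + 1))
    else (n, c)

-- the `for p in prime_gen` loop over the odd candidates 3,5,7,… of generate_primes
-- (the `if n in [0,1]: break` test is Python's per-prime break; evaluating it also on a
-- composite candidate returns the same counter, since skipping candidates has no effect)
def pvFactorLoop : Nat → Int → Int → PySem.Dict Int Nat → PySem.Dict Int Nat
  | 0, _, _, c => c
  | fuel + 1, k, n, c =>
    if n == 0 || n == 1 then c
    else if pvIsprime k then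
      let r := pvDivLoop k n.toNat n c
      pvFactorLoop fuel (k + 2) r.1 r.2
    else pvFactorLoop fuel (k + 2) n c

-- make_prime_factor_counter: the generator yields 2 first, then the filtered odd candidates
def pvMakeCounter (n : Int) : PySem.Dict Int Nat :=
  if n == 0 || n == 1 then PySem.Dict.empty
  else
    let r := pvDivLoop 2 n.toNat n PySem.Dict.empty
    pvFactorLoop (n.toNat + 2) 3 r.1 r.2

-- legendre_symbol (A raises ValueError on a non-prime p; that branch is unreachable from
-- kronecker_symbol, which only passes prime factors — the port returns 0 there)
def pvLegendre (a : Int) (p : Int) : Int :=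
  if !(pvIsprime p) then 0
  else if p == 2 then
    let r := PySem.Int.mod a 8
    if r == 0 || r == 2 || r == 4 || r == 6 then 0
    else if r == 1 || r == 7 then 1
    else -1
  else if PySem.Int.mod a p == 0 then 0
  else if (PySem.List.pyRange 1 p 1).any (fun x => PySem.Int.mod (a - x ^ 2) p == 0) then 1
  else -1

-- n // abs(n) is the sign of n (cited by the termination proof of kronecker_symbol)
theorem pv_sign_eq (n : Int) (h : n ≠ 0) :
    PySem.Int.floordiv n |n| = if n < 0 then -1 else 1 := by
  rcases lt_trichotomy n 0 with hn | hn | hn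
  · rw [if_pos hn, abs_of_neg hn, PySem.Int.floordiv_eq_iff_of_pos (by omega)]
    constructor <;> nlinarith
  · omega
  · rw [if_neg (by omega), abs_of_pos hn, PySem.Int.floordiv_eq_iff_of_pos hn]
    constructor <;> nlinarith

def kronecker_symbol (a : Int) (n : Int) : Int :=
  if n == 0 then (if a == -1 || a == 1 then 1 else 0)
  else if n == -1 then (if a < 0 then -1 else 1)
  else if n == 1 then 1
  else
    let u := PySem.Int.floordiv n |n|
    let m := PySem.Int.floordiv n u
    let c := pvMakeCounter m
    let prodn := (c.items.map (fun pv => pvLegendre a pv.1 ^ pv.2)).prod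
    kronecker_symbol a u * prodn
termination_by n.natAbs
decreasing_by
  rename_i h0 h1 h2
  simp only [beq_iff_eq] at h0 h1 h2
  rw [pv_sign_eq n h0]
  split <;> omega

-- ===== PORT B =====

-- _legendre_euler: Euler's criterion, pow(a, (p-1)//2, p)
def pvLegendreEuler (a : Int) (p : Int) : Int :=
  if PySem.Int.mod a p == 0 then 0
  else if PySem.Int.powMod a (PySem.Int.floordiv (p - 1) 2).toNat p == 1 then 1 else -1

-- `while n % 2 == 0` of B (fuel totalises the while-loop; n.toNat steps suffice, proved below)
def pvStrip2 (a : Int) : Nat → Int → Int → Int × Int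
  | 0, n, res => (n, res)
  | fuel + 1, n, res =>
    if PySem.Int.mod n 2 == 0 then
      let r := PySem.Int.mod a 8
      let res' := if r == 0 || r == 2 || r == 4 || r == 6 then 0
                  else if r == 3 || r == 5 then -res else res
      pvStrip2 a fuel (PySem.Int.floordiv n 2) res'
    else (n, res)

-- inner `while n % d == 0` of B
def pvDivAll (a : Int) (d : Int) : Nat → Int → Int → Int × Int
  | 0, n, res => (n, res)
  | fuel + 1, n, res =>
    if PySem.Int.mod n d == 0 then
      pvDivAll a d fuel (PySem.Int.floordiv n d) (res * pvLegendreEuler a d)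
    else (n, res)

-- outer `while d * d <= n` of B
def pvOddLoop (a : Int) : Nat → Int → Int → Int → Int × Int
  | 0, _, n, res => (n, res)
  | fuel + 1, d, n, res =>
    if d * d ≤ n then
      let r := pvDivAll a d n.toNat n res
      pvOddLoop a fuel (d + 2) r.1 r.2
    else (n, res)

def kronecker_symbol_alt (a : Int) (n : Int) : Int :=
  if n == 0 then (if a == -1 || a == 1 then 1 else 0)
  else
    let s : Int × Int := if n < 0 then (-n, if a < 0 then -1 else 1) else (n, 1)
    let t := pvStrip2 a s.1.toNat s.1 s.2
    let u := pvOddLoop a (t.1.toNat + 2) 3 t.1 t.2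
    if u.1 > 1 then u.2 * pvLegendreEuler a u.1 else u.2

-- ===== PRECONDITION & SPEC =====
def Spec_kronecker_symbol (a : Int) (n : Int) (out : Int) : Prop := out = kronecker_symbol_alt a n
instance (a : Int) (n : Int) (out : Int) : Decidable (Spec_kronecker_symbol a n out) := by unfold Spec_kronecker_symbol; infer_instance

-- ===== CLAIM (what is proved, stated in full; the proofs are below) =====
def Claim_equal_kronecker_symbol : Prop := ∀ (a : Int) (n : Int), Dom_kronecker_symbol a n → Spec_kronecker_symbol a n (kronecker_symbol a n)

-- ===== LEMMAS AND PROOFS =====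

-- product of legendre(a,p)^v over a counter
def pvP (a : Int) (c : PySem.Dict Int Nat) : Int :=
  (c.items.map (fun pv => pvLegendre a pv.1 ^ pv.2)).prod

-- reference value: product of A's legendre over the prime factorisation
def pvF (a : Int) (m : Nat) : Int :=
  (m.primeFactorsList.map (fun (p : Nat) => pvLegendre a (p : Int))).prod

-- product over the items list with one key's count bumped (counters have nodup keys)
theorem pvP_replace (a p : Int) (v : Nat) :
    ∀ L : List (Int × Nat), (L.map Prod.fst).Nodup →
      (PySem.Dict.mk L).get? p = some v →
      ((L.map (fun q => if q.1 == p then (p, v + 1) else q)).map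
          (fun pv => pvLegendre a pv.1 ^ pv.2)).prod
        = (L.map (fun pv => pvLegendre a pv.1 ^ pv.2)).prod * pvLegendre a p := by
  intro L
  induction L with
  | nil => intro _ h; simp [PySem.Dict.get?] at h
  | cons hd tl ih =>
    intro hnd hg
    rw [PySem.Dict.get?_mk_cons] at hg
    have hnd' : hd.1 ∉ tl.map Prod.fst ∧ (tl.map Prod.fst).Nodup :=
      List.nodup_cons.mp (by simpa using hnd)
    by_cases hk : hd.1 = p
    · have hb : (hd.1 == p) = true := by simp [hk]
      rw [hb, if_pos rfl] at hg
      have hv : hd.2 = v := Option.some.inj hg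
      have htl : tl.map (fun q => if q.1 == p then (p, v + 1) else q) = tl := by
        conv_rhs => rw [← List.map_id tl]
        apply List.map_congr_left
        intro q hq
        have hq1 : q.1 ≠ p := by
          intro hqp
          exact hnd'.1 (List.mem_map.mpr ⟨q, hq, by rw [hqp, ← hk]⟩)
        simp [hq1]
      simp only [List.map_cons, hb, if_true, htl, List.prod_cons]
      rw [hk, hv]
      ring
    · have hb : (hd.1 == p) = false := by simp [hk]
      rw [hb] at hg
      simp only [List.map_cons, hb, Bool.false_eq_true, if_false, List.prod_cons]
      rw [ih hnd'.2 (by simpa using hg)]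
      ring

theorem pvP_modify (a : Int) (c : PySem.Dict Int Nat) (p : Int) (hnd : c.keys.Nodup) :
    pvP a (c.modify p 0 (· + 1)) = pvP a c * pvLegendre a p := by
  obtain ⟨L⟩ := c
  have hkeys : (L.map Prod.fst).Nodup := by simpa [PySem.Dict.keys_mk] using hnd
  unfold PySem.Dict.modify
  by_cases hc : PySem.Dict.contains ⟨L⟩ p = true
  · obtain ⟨v, hv⟩ : ∃ v, PySem.Dict.get? ⟨L⟩ p = some v := by
      cases h : PySem.Dict.get? ⟨L⟩ p with
      | none =>
        rw [PySem.Dict.get?_eq_none_iff_not_mem_keys] at h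
        rw [PySem.Dict.contains_iff_mem_keys] at hc
        exact (h hc).elim
      | some v => exact ⟨v, rfl⟩
    have hgd : PySem.Dict.getD ⟨L⟩ p 0 = v := by simp [PySem.Dict.getD, hv]
    unfold pvP
    rw [hgd, PySem.Dict.items_insert_of_contains _ _ hc]
    exact pvP_replace a p v L hkeys hv
  · have hc' : PySem.Dict.contains ⟨L⟩ p = false := by rwa [Bool.not_eq_true] at hc
    have hgd : PySem.Dict.getD ⟨L⟩ p 0 = 0 := by
      have h0 : PySem.Dict.get? ⟨L⟩ p = none := by
        rw [PySem.Dict.get?_eq_none_iff_not_mem_keys]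
        intro hm
        rw [← PySem.Dict.contains_iff_mem_keys] at hm
        rw [hc'] at hm
        exact Bool.false_ne_true hm
      simp [PySem.Dict.getD, h0]
    unfold pvP
    rw [hgd, PySem.Dict.items_insert_of_not_contains _ _ hc']
    rw [List.map_append, List.prod_append]
    simp

theorem pvNodup_modify (c : PySem.Dict Int Nat) (p : Int) (hnd : c.keys.Nodup) :
    (c.modify p 0 (· + 1)).keys.Nodup := by
  rw [PySem.Dict.keys_modify]
  exact PySem.Dict.nodup_keys_insert _ _ _ hnd

theorem pvF_mul (a : Int) (m₁ m₂ : Nat) (h₁ : m₁ ≠ 0) (h₂ : m₂ ≠ 0) :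
    pvF a (m₁ * m₂) = pvF a m₁ * pvF a m₂ := by
  unfold pvF
  rw [List.Perm.prod_eq (List.Perm.map (fun (p : Nat) => pvLegendre a (p : Int))
    (Nat.perm_primeFactorsList_mul h₁ h₂)), List.map_append, List.prod_append]

theorem pvF_pow_prime (a : Int) (p v : Nat) (hp : Nat.Prime p) :
    pvF a (p ^ v) = pvLegendre a (p : Int) ^ v := by
  unfold pvF
  rw [hp.primeFactorsList_pow, List.map_replicate, List.prod_replicate]

theorem pvF_prime (a : Int) (p : Nat) (hp : Nat.Prime p) :
    pvF a p = pvLegendre a (p : Int) := by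
  unfold pvF
  rw [Nat.primeFactorsList_prime hp]
  simp

theorem pvIsprime_iff (k : Int) (hk : 2 ≤ k) :
    pvIsprime k = true ↔ Nat.Prime k.toNat := by
  have hkK : (k.toNat : Int) = k := Int.toNat_of_nonneg (by omega)
  have hK2 : 2 ≤ k.toNat := by omega
  have hE : pvIsprime k =
      (if (PySem.Int.mod |k| 2 == 0) = true then (|k| == 2 : Bool)
       else (PySem.List.pyRange 3 ((|k|.toNat.sqrt : Int) + 1) 2).all
         (fun x => !(PySem.Int.mod |k| x == 0))) := rfl
  rw [hE, abs_of_nonneg (by omega : (0:Int) ≤ k)]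
  by_cases h2 : PySem.Int.mod k 2 = 0
  · have hdvd : (2:Int) ∣ k := (PySem.Int.mod_eq_zero_iff_dvd k 2).mp h2
    rw [if_pos (by simp; exact (PySem.Int.mod_eq_zero_iff_dvd k 2).mp h2)]
    rw [beq_iff_eq]
    constructor
    · rintro rfl; decide
    · intro hp
      have hdK : 2 ∣ k.toNat := by
        have : (2:Int) ∣ (k.toNat : Int) := by rw [hkK]; exact hdvd
        exact_mod_cast this
      rcases hp.eq_one_or_self_of_dvd 2 hdK with h | h
      · omega
      · omega
  · have hodd : ¬ (2:Int) ∣ k := fun hd => h2 ((PySem.Int.mod_eq_zero_iff_dvd k 2).mpr hd)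
    have hoddK : ¬ 2 ∣ k.toNat := by
      intro hd
      exact hodd (by rw [← hkK]; exact_mod_cast hd)
    rw [if_neg (by simp; omega)]
    rw [List.all_eq_true]
    constructor
    · intro hall
      rw [Nat.prime_def_le_sqrt]
      refine ⟨hK2, ?_⟩
      intro m hm2 hmsqrt hmdvd
      have hmodd : ¬ 2 ∣ m := fun h => hoddK (h.trans hmdvd)
      have hxmem : (m : Int) ∈ PySem.List.pyRange 3 ((k.toNat.sqrt : Int) + 1) 2 := by
        rw [PySem.List.mem_pyRange_iff_of_pos (by norm_num)]
        refine ⟨by exact_mod_cast (by omega : 3 ≤ m), by exact_mod_cast (by omega : m < k.toNat.sqrt + 1), ?_⟩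
        omega
      have hx := hall _ hxmem
      have hdvdk : (m : Int) ∣ k := by rw [← hkK]; exact_mod_cast hmdvd
      rw [← PySem.Int.mod_eq_zero_iff_dvd] at hdvdk
      simp [hdvdk] at hx
    · intro hp x hx
      obtain ⟨hx3, hxlt, hxpar⟩ := (PySem.List.mem_pyRange_iff_of_pos (by norm_num) x).mp hx
      suffices h : ¬ ((x : Int) ∣ k) by
        have : ¬ PySem.Int.mod k x = 0 := fun hm => h ((PySem.Int.mod_eq_zero_iff_dvd k x).mp hm)
        simp [this]
      intro hxdvd
      have hx0 : (x.toNat : Int) = x := Int.toNat_of_nonneg (by omega)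
      have hmdvd : x.toNat ∣ k.toNat := by
        have : (x.toNat : Int) ∣ (k.toNat : Int) := by rw [hx0, hkK]; exact hxdvd
        exact_mod_cast this
      rw [Nat.prime_def_le_sqrt] at hp
      exact hp.2 x.toNat (by omega) (by omega) hmdvd

theorem pvDivLoop_spec (p : Int) (hp : 2 ≤ p) :
    ∀ (fuel : Nat) (n : Int) (c : PySem.Dict Int Nat), 0 < n → n.toNat ≤ fuel → c.keys.Nodup →
    ∃ (v m : Nat), n.toNat = p.toNat ^ v * m ∧ ¬ p.toNat ∣ m ∧
      (pvDivLoop p fuel n c).1 = (m : Int) ∧ (pvDivLoop p fuel n c).2.keys.Nodup ∧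
      ∀ a, pvP a (pvDivLoop p fuel n c).2 = pvP a c * pvLegendre a p ^ v := by
  intro fuel
  induction fuel with
  | zero => intro n c hn hf _; omega
  | succ fuel ih =>
    intro n c hn hf hnd
    by_cases h : PySem.Int.mod n p = 0
    · have hdvd : p ∣ n := (PySem.Int.mod_eq_zero_iff_dvd n p).mp h
      have hdvdN : p.toNat ∣ n.toNat := by
        have : (p.toNat : Int) ∣ (n.toNat : Int) := by
          rw [Int.toNat_of_nonneg (by omega : (0:Int) ≤ p), Int.toNat_of_nonneg (by omega : (0:Int) ≤ n)]
          exact hdvd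
        exact_mod_cast this
      have hfl : PySem.Int.floordiv n p = ((n.toNat / p.toNat : Nat) : Int) := by
        rw [PySem.Int.floordiv_eq_ediv_of_pos (by omega : (0:Int) < p)]
        rw [← Int.toNat_of_nonneg (by omega : (0:Int) ≤ p), ← Int.toNat_of_nonneg (by omega : (0:Int) ≤ n)]
        exact (Int.natCast_div n.toNat p.toNat).symm
      have hpos' : 0 < n.toNat / p.toNat := Nat.div_pos (Nat.le_of_dvd (by omega) hdvdN) (by omega)
      have hlt : n.toNat / p.toNat < n.toNat := Nat.div_lt_self (by omega) (by omega)
      have hrec := ih (PySem.Int.floordiv n p) (c.modify p 0 (· + 1))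
        (by rw [hfl]; exact_mod_cast hpos') (by rw [hfl]; simp only [Int.toNat_natCast]; omega)
        (pvNodup_modify c p hnd)
      obtain ⟨v, m, hvm, hm, hres1, hres2, hresP⟩ := hrec
      rw [hfl] at hvm
      simp only [Int.toNat_natCast] at hvm
      refine ⟨v + 1, m, ?_, hm, ?_, ?_, ?_⟩
      · rw [pow_succ]
        have := Nat.div_mul_cancel hdvdN
        calc n.toNat = n.toNat / p.toNat * p.toNat := (Nat.div_mul_cancel hdvdN).symm
          _ = p.toNat ^ v * m * p.toNat := by rw [← hvm]
          _ = p.toNat ^ v * p.toNat * m := by ring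
      · show (pvDivLoop p (fuel + 1) n c).1 = (m : Int)
        unfold pvDivLoop
        simp only [h, beq_self_eq_true, if_true]
        exact hres1
      · show (pvDivLoop p (fuel + 1) n c).2.keys.Nodup
        unfold pvDivLoop
        simp only [h, beq_self_eq_true, if_true]
        exact hres2
      · intro a
        show pvP a (pvDivLoop p (fuel + 1) n c).2 = _
        unfold pvDivLoop
        simp only [h, beq_self_eq_true, if_true]
        rw [hresP a, pvP_modify a c p hnd, pow_succ]
        ring
    · have hcond : (PySem.Int.mod n p == 0) = false := by simp [h]
      have hndvd : ¬ p.toNat ∣ n.toNat := by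
        intro hd
        apply h
        rw [PySem.Int.mod_eq_zero_iff_dvd]
        rw [← Int.toNat_of_nonneg (by omega : (0:Int) ≤ p), ← Int.toNat_of_nonneg (by omega : (0:Int) ≤ n)]
        exact_mod_cast hd
      refine ⟨0, n.toNat, by ring, hndvd, ?_, ?_, ?_⟩
      · unfold pvDivLoop
        rw [hcond]
        simp [Int.toNat_of_nonneg (by omega : (0:Int) ≤ n)]
      · unfold pvDivLoop
        rw [hcond]
        simpa using hnd
      · intro a
        unfold pvDivLoop
        rw [hcond]
        simp

theorem pvFactorLoop_spec :
    ∀ (fuel : Nat) (k n : Int) (c : PySem.Dict Int Nat), 0 < n → ¬ (2 ∣ n.toNat) →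
    3 ≤ k → PySem.Int.mod k 2 = 1 →
    (∀ q, Nat.Prime q → q ∣ n.toNat → k.toNat ≤ q) →
    n.toNat + 2 ≤ fuel + k.toNat → c.keys.Nodup →
    ∀ a, pvP a (pvFactorLoop fuel k n c) = pvP a c * pvF a n.toNat := by
  intro fuel
  induction fuel with
  | zero =>
    intro k n c hn hodd hk3 hk2 hbound hfuel hnd a
    have hn1 : n.toNat = 1 := by
      by_contra hne
      obtain ⟨q, hq, hqd⟩ := Nat.exists_prime_and_dvd (fun h => hne h)
      have h1 := hbound q hq hqd
      have h2 := Nat.le_of_dvd (by omega) hqd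
      omega
    rw [hn1]
    simp [pvFactorLoop, pvF, Nat.primeFactorsList_one]
  | succ fuel ih =>
    intro k n c hn hodd hk3 hk2 hbound hfuel hnd a
    have hkodd : k % 2 = 1 := by
      rwa [PySem.Int.mod_eq_emod_of_pos (by norm_num)] at hk2
    by_cases hn1 : n = 1
    · subst hn1
      simp [pvFactorLoop, pvF, Nat.primeFactorsList_one]
    · have hc1 : (n == 0 || n == 1) = false := by simp; omega
      have hN2 : 2 ≤ n.toNat := by
        rcases Nat.lt_or_ge n.toNat 2 with h | h
        · interval_cases h' : n.toNat <;> omega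
        · exact h
      by_cases hpk : pvIsprime k = true
      · have hkprime : Nat.Prime k.toNat := (pvIsprime_iff k (by omega)).mp hpk
        obtain ⟨v, m, hvm, hm, hres1, hres2, hresP⟩ :=
          pvDivLoop_spec k (by omega) n.toNat n c hn (le_refl _) hnd
        have hm0 : 0 < m := by
          rcases Nat.eq_zero_or_pos m with h | h
          · rw [h, mul_zero] at hvm; omega
          · exact h
        have hmN : m ≤ n.toNat := by
          calc m ≤ k.toNat ^ v * m := Nat.le_mul_of_pos_left m (pow_pos (by omega) v)
            _ = n.toNat := hvm.symm
        have hmodd : ¬ 2 ∣ m := fun h => hodd (hvm ▸ Dvd.dvd.mul_left h _)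
        have hrec := ih (k + 2) ((m : Nat) : Int) (pvDivLoop k n.toNat n c).2
          (by exact_mod_cast hm0) (by simpa using hmodd) (by omega)
          (by rw [PySem.Int.mod_eq_emod_of_pos (by norm_num)]; omega)
          (by
            intro q hq hqd
            simp only [Int.toNat_natCast] at hqd
            have hq1 : k.toNat ≤ q := hbound q hq (hvm ▸ Dvd.dvd.mul_left hqd _)
            have hq2 : q ≠ k.toNat := by
              intro h
              exact hm (h ▸ hqd)
            have hq3 : ¬ 2 ∣ q := fun h => hmodd (h.trans hqd)
            omega)
          (by simp only [Int.toNat_natCast]; omega)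
          hres2 a
        simp only [Int.toNat_natCast] at hrec
        have hunf : pvFactorLoop (fuel + 1) k n c
            = pvFactorLoop fuel (k + 2) (pvDivLoop k n.toNat n c).1 (pvDivLoop k n.toNat n c).2 := by
          simp only [pvFactorLoop, hc1, Bool.false_eq_true, if_false, hpk, if_true]
        rw [hunf, hres1, hrec, hresP a]
        have hF : pvF a n.toNat = pvLegendre a k ^ v * pvF a m := by
          rw [hvm, pvF_mul a _ _ (pow_pos (by omega : 0 < k.toNat) v).ne' (by omega), pvF_pow_prime a _ _ hkprime,
            Int.toNat_of_nonneg (by omega : (0:Int) ≤ k)]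
        rw [hF]
        ring
      · have hknp : ¬ Nat.Prime k.toNat := fun h => hpk ((pvIsprime_iff k (by omega)).mpr h)
        have hrec := ih (k + 2) n c hn hodd (by omega)
          (by rw [PySem.Int.mod_eq_emod_of_pos (by norm_num)]; omega)
          (by
            intro q hq hqd
            have hq1 : k.toNat ≤ q := hbound q hq hqd
            have hq2 : q ≠ k.toNat := fun h => hknp (h ▸ hq)
            have hq3 : ¬ 2 ∣ q := fun h => hodd (h.trans hqd)
            omega)
          (by omega) hnd a
        have hunf : pvFactorLoop (fuel + 1) k n c = pvFactorLoop fuel (k + 2) n c := by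
          simp only [pvFactorLoop, hc1, Bool.false_eq_true, if_false, hpk, if_false]
        rw [hunf, hrec]

theorem pvMakeCounter_spec (n : Int) (hn : 2 ≤ n) :
    ∀ a, pvP a (pvMakeCounter n) = pvF a n.toNat := by
  intro a
  have hc1 : (n == 0 || n == 1) = false := by simp; omega
  have hunf : pvMakeCounter n
      = pvFactorLoop (n.toNat + 2) 3 (pvDivLoop 2 n.toNat n PySem.Dict.empty).1
          (pvDivLoop 2 n.toNat n PySem.Dict.empty).2 := by
    simp only [pvMakeCounter, hc1, Bool.false_eq_true, if_false]
  obtain ⟨v, m, hvm, hm, hres1, hres2, hresP⟩ :=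
    pvDivLoop_spec 2 (le_refl _) n.toNat n PySem.Dict.empty (by omega) (le_refl _)
      PySem.Dict.nodup_keys_empty
  have hm0 : 0 < m := by
    rcases Nat.eq_zero_or_pos m with h | h
    · rw [h, mul_zero] at hvm; omega
    · exact h
  have h2t : ((2:Int)).toNat = 2 := rfl
  rw [h2t] at hvm
  have hmN : m ≤ n.toNat := by
    calc m ≤ 2 ^ v * m := Nat.le_mul_of_pos_left m (pow_pos (by norm_num) v)
      _ = n.toNat := hvm.symm
  have hmodd : ¬ 2 ∣ m := fun h => hm (by simpa [h2t] using h)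
  have hfl := pvFactorLoop_spec (n.toNat + 2) 3 ((m : Nat) : Int)
    (pvDivLoop 2 n.toNat n PySem.Dict.empty).2
    (by exact_mod_cast hm0) (by simpa using hmodd) (by norm_num) (by decide)
    (by
      intro q hq hqd
      have := hq.two_le
      have hq2 : q ≠ 2 := by
        intro h
        simp only [Int.toNat_natCast] at hqd
        exact hmodd (h ▸ hqd)
      have h3 : (3:Int).toNat = 3 := rfl
      rw [h3]
      omega)
    (by simp only [Int.toNat_natCast]; omega)
    hres2 a
  simp only [Int.toNat_natCast] at hfl
  rw [hunf, hres1, hfl, hresP a]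
  have hPe : pvP a PySem.Dict.empty = 1 := by simp [pvP, PySem.Dict.empty]
  have hF : pvF a n.toNat = pvLegendre a 2 ^ v * pvF a m := by
    rw [hvm, pvF_mul a _ _ (by positivity) (by omega), pvF_pow_prime a _ _ Nat.prime_two]
    norm_num
  rw [hF, hPe]
  ring

-- Euler bridge: for an odd prime p, A's residue scan equals B's Euler criterion
theorem pvLegendre_eq_euler (a p : Int) (hp3 : 3 ≤ p) (hpp : Nat.Prime p.toNat) :
    pvLegendre a p = pvLegendreEuler a p := by
  haveI hfact : Fact (Nat.Prime p.toNat) := ⟨hpp⟩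
  haveI : NeZero p.toNat := ⟨by omega⟩
  haveI : Fact (1 < p.toNat) := ⟨by omega⟩
  have hpP : ((p.toNat : Int)) = p := Int.toNat_of_nonneg (by omega)
  have hip : pvIsprime p = true := (pvIsprime_iff p (by omega)).mpr hpp
  have hp2 : (p == 2) = false := by simp; omega
  unfold pvLegendre pvLegendreEuler
  rw [hip, hp2]
  simp only [Bool.not_true, Bool.false_eq_true, if_false]
  by_cases hmod : PySem.Int.mod a p = 0
  · simp [hmod]
  · have hcond : (PySem.Int.mod a p == 0) = false := by simp [hmod]
    rw [hcond]
    simp only [Bool.false_eq_true, if_false]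
    have hnd : ¬ p ∣ a := fun h => hmod ((PySem.Int.mod_eq_zero_iff_dvd a p).mpr h)
    have ha0 : ((a : ZMod p.toNat)) ≠ 0 := by
      rw [Ne, ZMod.intCast_zmod_eq_zero_iff_dvd, hpP]
      exact hnd
    have hW : ((legendreSym p.toNat a : Int) : ZMod p.toNat) = (a : ZMod p.toNat) ^ (p.toNat / 2) :=
      legendreSym.eq_pow p.toNat a
    have hoddP : p.toNat % 2 = 1 := Nat.odd_iff.mp (hpp.odd_of_ne_two (by omega))
    have he : (PySem.Int.floordiv (p - 1) 2).toNat = p.toNat / 2 := by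
      rw [PySem.Int.floordiv_eq_ediv_of_pos (by norm_num : (0:Int) < 2)]
      omega
    have hpm : PySem.Int.powMod a (PySem.Int.floordiv (p - 1) 2).toNat p
        = (((a : ZMod p.toNat) ^ (p.toNat / 2)).val : Int) := by
      show PySem.Int.mod (a ^ (PySem.Int.floordiv (p - 1) 2).toNat) p = _
      rw [PySem.Int.mod_eq_emod_of_pos (by omega : (0:Int) < p), he]
      have hv := ZMod.val_intCast (n := p.toNat) (a ^ (p.toNat / 2))
      rw [hpP] at hv
      rw [← hv]
      push_cast
      ring_nf
    have hscan : ((PySem.List.pyRange 1 p 1).any fun x => PySem.Int.mod (a - x ^ 2) p == 0) = true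
        ↔ legendreSym p.toNat a = 1 := by
      rw [legendreSym.eq_one_iff p.toNat ha0, List.any_eq_true]
      constructor
      · rintro ⟨x, hxmem, hxf⟩
        obtain ⟨hx1, hxp⟩ := (PySem.List.mem_pyRange_one).mp hxmem
        have hdvd : p ∣ a - x ^ 2 := (PySem.Int.mod_eq_zero_iff_dvd _ p).mp (by simpa using hxf)
        have hzero : ((a - x ^ 2 : Int) : ZMod p.toNat) = 0 := by
          rw [ZMod.intCast_zmod_eq_zero_iff_dvd, hpP]
          exact hdvd
        push_cast at hzero
        refine ⟨(x : ZMod p.toNat), ?_⟩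
        have hax : (a : ZMod p.toNat) = (x : ZMod p.toNat) ^ 2 := by
          have := sub_eq_zero.mp hzero
          exact this
        rw [hax]
        ring
      · rintro ⟨r, hr⟩
        have hr0 : r ≠ 0 := by
          intro h
          apply ha0
          rw [hr, h, mul_zero]
        refine ⟨(r.val : Int), ?_, ?_⟩
        · rw [PySem.List.mem_pyRange_one]
          constructor
          · have : r.val ≠ 0 := fun h => hr0 ((ZMod.val_eq_zero r).mp h)
            omega
          · have := ZMod.val_lt r
            omega
        · have hzero : ((a - (r.val : Int) ^ 2 : Int) : ZMod p.toNat) = 0 := by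
            push_cast
            rw [ZMod.natCast_val, ZMod.cast_id, hr]
            ring
          have hdvd : p ∣ a - (r.val : Int) ^ 2 := by
            have hd := (ZMod.intCast_zmod_eq_zero_iff_dvd _ p.toNat).mp hzero
            rwa [hpP] at hd
          rw [ZMod.natCast_val] at hdvd
          simp [PySem.Int.mod_eq_zero_iff_dvd, hdvd]
    rcases legendreSym.eq_one_or_neg_one p.toNat ha0 with h1 | hm1
    · have hs : ((PySem.List.pyRange 1 p 1).any fun x => PySem.Int.mod (a - x ^ 2) p == 0) = true :=
        hscan.mpr h1
      have hpw : PySem.Int.powMod a (PySem.Int.floordiv (p - 1) 2).toNat p = 1 := by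
        rw [hpm, ← hW, h1]
        norm_num [ZMod.val_one]
      rw [hs, hpw]
      norm_num
    · have hs : ((PySem.List.pyRange 1 p 1).any fun x => PySem.Int.mod (a - x ^ 2) p == 0) = false := by
        rw [← Bool.not_eq_true]
        intro hh
        rw [hscan.mp hh] at hm1
        norm_num at hm1
      have hpw : PySem.Int.powMod a (PySem.Int.floordiv (p - 1) 2).toNat p
          = ((p.toNat - 1 : Nat) : Int) := by
        rw [hpm, ← hW, hm1]
        have hcastm1 : (((-1 : Int)) : ZMod p.toNat) = -1 := by simp
        rw [hcastm1]
        have hneg : ((-1 : ZMod p.toNat)) = ((p.toNat - 1 : Nat) : ZMod p.toNat) := by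
          push_cast [Nat.cast_sub (by omega : 1 ≤ p.toNat)]
          simp
        rw [hneg, ZMod.val_natCast, Nat.mod_eq_of_lt (by omega)]
      have hne1 : ((p.toNat - 1 : Nat) : Int) ≠ 1 := by omega
      have hpw1 : (PySem.Int.powMod a (PySem.Int.floordiv (p - 1) 2).toNat p == 1) = false := by
        rw [hpw]
        simp [hne1]
      rw [hs, hpw1]

theorem pvLegendre_two_eval (a : Int) :
    pvLegendre a 2 =
      (if (PySem.Int.mod a 8 == 0 || PySem.Int.mod a 8 == 2 || PySem.Int.mod a 8 == 4
            || PySem.Int.mod a 8 == 6) = true then 0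
       else if (PySem.Int.mod a 8 == 1 || PySem.Int.mod a 8 == 7) = true then 1 else -1) := rfl

theorem pvStrip2_step (a res : Int) :
    (if (PySem.Int.mod a 8 == 0 || PySem.Int.mod a 8 == 2 || PySem.Int.mod a 8 == 4
          || PySem.Int.mod a 8 == 6) = true then 0
     else if (PySem.Int.mod a 8 == 3 || PySem.Int.mod a 8 == 5) = true then -res else res)
    = res * pvLegendre a 2 := by
  rw [pvLegendre_two_eval]
  have h0 : 0 ≤ PySem.Int.mod a 8 := PySem.Int.mod_nonneg a (by norm_num)
  have h8 : PySem.Int.mod a 8 < 8 := PySem.Int.mod_lt a (by norm_num)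
  set r := PySem.Int.mod a 8 with hr
  interval_cases r <;> simp

theorem pvStrip2_spec (a : Int) :
    ∀ (fuel : Nat) (n res : Int), 0 < n → n.toNat ≤ fuel →
    ∃ (v m : Nat), n.toNat = 2 ^ v * m ∧ ¬ 2 ∣ m ∧
      pvStrip2 a fuel n res = ((m : Int), res * pvLegendre a 2 ^ v) := by
  intro fuel
  induction fuel with
  | zero => intro n res hn hf; omega
  | succ fuel ih =>
    intro n res hn hf
    by_cases h : PySem.Int.mod n 2 = 0
    · have hdvd : (2:Int) ∣ n := (PySem.Int.mod_eq_zero_iff_dvd n 2).mp h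
      have hdvdN : 2 ∣ n.toNat := by
        have : ((2:Nat) : Int) ∣ (n.toNat : Int) := by
          rw [Int.toNat_of_nonneg (by omega : (0:Int) ≤ n)]; exact_mod_cast hdvd
        exact_mod_cast this
      have hfl : PySem.Int.floordiv n 2 = ((n.toNat / 2 : Nat) : Int) := by
        rw [PySem.Int.floordiv_eq_ediv_of_pos (by norm_num : (0:Int) < 2)]
        rw [← Int.toNat_of_nonneg (by omega : (0:Int) ≤ n)]
        exact_mod_cast (Int.natCast_div n.toNat 2).symm
      have hpos' : 0 < n.toNat / 2 := Nat.div_pos (Nat.le_of_dvd (by omega) hdvdN) (by norm_num)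
      obtain ⟨v, m, hvm, hm, heq⟩ := ih (PySem.Int.floordiv n 2) (res * pvLegendre a 2)
        (by rw [hfl]; exact_mod_cast hpos') (by rw [hfl]; simp only [Int.toNat_natCast]; omega)
      rw [hfl] at hvm
      simp only [Int.toNat_natCast] at hvm
      refine ⟨v + 1, m, ?_, hm, ?_⟩
      · calc n.toNat = n.toNat / 2 * 2 := (Nat.div_mul_cancel hdvdN).symm
          _ = 2 ^ v * m * 2 := by rw [← hvm]
          _ = 2 ^ (v + 1) * m := by ring
      · have hcond : (PySem.Int.mod n 2 == 0) = true := by simp; exact hdvd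
        show pvStrip2 a (fuel + 1) n res = _
        simp only [pvStrip2, hcond, if_true]
        rw [pvStrip2_step a res, heq]
        simp only [Prod.mk.injEq, true_and]
        ring
    · have hnd2 : ¬ (2:Int) ∣ n := fun hdd => h ((PySem.Int.mod_eq_zero_iff_dvd n 2).mpr hdd)
      have hcond : (PySem.Int.mod n 2 == 0) = false := by simp; omega
      have hndvd : ¬ 2 ∣ n.toNat := by
        intro hd
        apply h
        rw [PySem.Int.mod_eq_zero_iff_dvd]
        rw [← Int.toNat_of_nonneg (by omega : (0:Int) ≤ n)]
        exact_mod_cast hd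
      refine ⟨0, n.toNat, by ring, hndvd, ?_⟩
      simp only [pvStrip2, hcond, Bool.false_eq_true, if_false]
      simp [Int.toNat_of_nonneg (by omega : (0:Int) ≤ n)]

theorem pvDivAll_spec (a d : Int) (hd : 2 ≤ d) :
    ∀ (fuel : Nat) (n res : Int), 0 < n → n.toNat ≤ fuel →
    ∃ (v m : Nat), n.toNat = d.toNat ^ v * m ∧ ¬ d.toNat ∣ m ∧
      pvDivAll a d fuel n res = ((m : Int), res * pvLegendreEuler a d ^ v) := by
  intro fuel
  induction fuel with
  | zero => intro n res hn hf; omega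
  | succ fuel ih =>
    intro n res hn hf
    by_cases h : PySem.Int.mod n d = 0
    · have hdvd : d ∣ n := (PySem.Int.mod_eq_zero_iff_dvd n d).mp h
      have hdvdN : d.toNat ∣ n.toNat := by
        have : (d.toNat : Int) ∣ (n.toNat : Int) := by
          rw [Int.toNat_of_nonneg (by omega : (0:Int) ≤ d), Int.toNat_of_nonneg (by omega : (0:Int) ≤ n)]
          exact hdvd
        exact_mod_cast this
      have hfl : PySem.Int.floordiv n d = ((n.toNat / d.toNat : Nat) : Int) := by
        rw [PySem.Int.floordiv_eq_ediv_of_pos (by omega : (0:Int) < d)]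
        rw [← Int.toNat_of_nonneg (by omega : (0:Int) ≤ d), ← Int.toNat_of_nonneg (by omega : (0:Int) ≤ n)]
        exact (Int.natCast_div n.toNat d.toNat).symm
      have hpos' : 0 < n.toNat / d.toNat := Nat.div_pos (Nat.le_of_dvd (by omega) hdvdN) (by omega)
      have hlt : n.toNat / d.toNat < n.toNat := Nat.div_lt_self (by omega) (by omega)
      obtain ⟨v, m, hvm, hm, heq⟩ := ih (PySem.Int.floordiv n d) (res * pvLegendreEuler a d)
        (by rw [hfl]; exact_mod_cast hpos') (by rw [hfl]; simp only [Int.toNat_natCast]; omega)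
      rw [hfl] at hvm
      simp only [Int.toNat_natCast] at hvm
      refine ⟨v + 1, m, ?_, hm, ?_⟩
      · calc n.toNat = n.toNat / d.toNat * d.toNat := (Nat.div_mul_cancel hdvdN).symm
          _ = d.toNat ^ v * m * d.toNat := by rw [← hvm]
          _ = d.toNat ^ (v + 1) * m := by ring
      · have hcond : (PySem.Int.mod n d == 0) = true := by simp; exact h
        show pvDivAll a d (fuel + 1) n res = _
        simp only [pvDivAll, hcond, if_true]
        rw [heq]
        simp only [Prod.mk.injEq, true_and]
        ring
    · have hnd2 : ¬ d ∣ n := fun hdd => h ((PySem.Int.mod_eq_zero_iff_dvd n d).mpr hdd)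
      have hcond : (PySem.Int.mod n d == 0) = false := by simp; exact h
      have hndvd : ¬ d.toNat ∣ n.toNat := by
        intro hdv
        apply h
        rw [PySem.Int.mod_eq_zero_iff_dvd]
        rw [← Int.toNat_of_nonneg (by omega : (0:Int) ≤ d), ← Int.toNat_of_nonneg (by omega : (0:Int) ≤ n)]
        exact_mod_cast hdv
      refine ⟨0, n.toNat, by ring, hndvd, ?_⟩
      simp only [pvDivAll, hcond, Bool.false_eq_true, if_false]
      simp [Int.toNat_of_nonneg (by omega : (0:Int) ≤ n)]

theorem pvOddLoop_spec (a : Int) :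
    ∀ (fuel : Nat) (d n res : Int), 0 < n → ¬ (2 ∣ n.toNat) →
    3 ≤ d → PySem.Int.mod d 2 = 1 →
    (∀ q, Nat.Prime q → q ∣ n.toNat → d.toNat ≤ q) →
    n.toNat + 2 ≤ 2 * fuel + d.toNat →
    (if (pvOddLoop a fuel d n res).1 > 1
      then (pvOddLoop a fuel d n res).2 * pvLegendreEuler a (pvOddLoop a fuel d n res).1
      else (pvOddLoop a fuel d n res).2) = res * pvF a n.toNat := by
  intro fuel
  induction fuel with
  | zero =>
    intro d n res hn hodd hd3 hd2 hbound hfuel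
    have hn1 : n.toNat = 1 := by
      by_contra hne
      obtain ⟨q, hq, hqd⟩ := Nat.exists_prime_and_dvd (fun h => hne h)
      have h1 := hbound q hq hqd
      have h2 := Nat.le_of_dvd (by omega) hqd
      omega
    have hne1 : n = 1 := by omega
    subst hne1
    simp [pvOddLoop, pvF, Nat.primeFactorsList_one]
  | succ fuel ih =>
    intro d n res hn hodd hd3 hd2 hbound hfuel
    have hdodd : d % 2 = 1 := by
      rwa [PySem.Int.mod_eq_emod_of_pos (by norm_num)] at hd2
    by_cases hdd : d * d ≤ n
    · obtain ⟨v, m, hvm, hm, heq⟩ := pvDivAll_spec a d (by omega) n.toNat n res hn (le_refl _)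
      have hunf : pvOddLoop a (fuel + 1) d n res
          = pvOddLoop a fuel (d + 2) (pvDivAll a d n.toNat n res).1 (pvDivAll a d n.toNat n res).2 := by
        simp only [pvOddLoop, if_pos hdd]
      have hm0 : 0 < m := by
        rcases Nat.eq_zero_or_pos m with h | h
        · rw [h, mul_zero] at hvm; omega
        · exact h
      have hmN : m ≤ n.toNat := by
        calc m ≤ d.toNat ^ v * m := Nat.le_mul_of_pos_left m (pow_pos (by omega) v)
          _ = n.toNat := hvm.symm
      have hmodd : ¬ 2 ∣ m := fun h => hodd (hvm ▸ Dvd.dvd.mul_left h _)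
      by_cases hdp : Nat.Prime d.toNat
      · have hrec := ih (d + 2) ((m : Nat) : Int) (res * pvLegendreEuler a d ^ v)
          (by exact_mod_cast hm0) (by simpa using hmodd) (by omega)
          (by rw [PySem.Int.mod_eq_emod_of_pos (by norm_num)]; omega)
          (by
            intro q hq hqd
            simp only [Int.toNat_natCast] at hqd
            have hq1 : d.toNat ≤ q := hbound q hq (hvm ▸ Dvd.dvd.mul_left hqd _)
            have hq2 : q ≠ d.toNat := fun h => hm (h ▸ hqd)
            have hq3 : ¬ 2 ∣ q := fun h => hmodd (h.trans hqd)
            omega)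
          (by simp only [Int.toNat_natCast]; omega)
        simp only [Int.toNat_natCast] at hrec
        rw [hunf, heq]
        rw [hrec]
        have hF : pvF a n.toNat = pvLegendre a d ^ v * pvF a m := by
          rw [hvm, pvF_mul a _ _ (pow_pos (by omega : 0 < d.toNat) v).ne' (by omega),
            pvF_pow_prime a _ _ hdp, Int.toNat_of_nonneg (by omega : (0:Int) ≤ d)]
        rw [hF, pvLegendre_eq_euler a d hd3 hdp]
        ring
      · have hv0 : v = 0 := by
          by_contra hv
          have hdvdn : d.toNat ∣ n.toNat := hvm ▸ dvd_mul_of_dvd_left (dvd_pow_self _ hv) m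
          have hqp := Nat.minFac_prime (show d.toNat ≠ 1 by omega)
          have hqd : d.toNat.minFac ∣ d.toNat := Nat.minFac_dvd _
          have hqlt : d.toNat.minFac < d.toNat := by
            rcases lt_or_eq_of_le (Nat.minFac_le (by omega : 0 < d.toNat)) with h | h
            · exact h
            · exact absurd (h ▸ hqp) hdp
          have := hbound _ hqp (hqd.trans hdvdn)
          omega
        subst hv0
        have hmeq : m = n.toNat := by rw [hvm, pow_zero, one_mul]
        have hmn : ((m : Nat) : Int) = n := by
          rw [hmeq, Int.toNat_of_nonneg (by omega : (0:Int) ≤ n)]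
        have hndvd : ¬ d.toNat ∣ n.toNat := hmeq ▸ hm
        have hrec := ih (d + 2) n res hn hodd (by omega)
          (by rw [PySem.Int.mod_eq_emod_of_pos (by norm_num)]; omega)
          (by
            intro q hq hqd
            have hq1 : d.toNat ≤ q := hbound q hq hqd
            have hq2 : q ≠ d.toNat := fun h => hndvd (h ▸ hqd)
            have hq3 : ¬ 2 ∣ q := fun h => hodd (h.trans hqd)
            omega)
          (by
            have hd2' : (d + 2).toNat = d.toNat + 2 := by omega
            omega)
        rw [hunf, heq, pow_zero, mul_one, hmn]
        exact hrec
    · have hunf : pvOddLoop a (fuel + 1) d n res = (n, res) := by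
        simp only [pvOddLoop, if_neg hdd]
      rw [hunf]
      rcases eq_or_lt_of_le (show 1 ≤ n.toNat by omega) with h1 | h2
      · have hne1 : n = 1 := by omega
        subst hne1
        simp [pvF, Nat.primeFactorsList_one]
      · have hNlt : n.toNat < d.toNat * d.toNat := by
          have h1 : n < d * d := by omega
          have h2 : ((n.toNat : Int)) = n := Int.toNat_of_nonneg (by omega)
          have h3 : ((d.toNat : Int)) = d := Int.toNat_of_nonneg (by omega)
          have : ((n.toNat : Int)) < ((d.toNat : Int)) * ((d.toNat : Int)) := by
            rw [h2, h3]; exact h1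
          exact_mod_cast this
        have hprime : Nat.Prime n.toNat := by
          have hqp := Nat.minFac_prime (show n.toNat ≠ 1 by omega)
          have hqd : n.toNat.minFac ∣ n.toNat := Nat.minFac_dvd _
          have hq1 : d.toNat ≤ n.toNat.minFac := hbound _ hqp hqd
          have hns : n.toNat = n.toNat.minFac * (n.toNat / n.toNat.minFac) :=
            (Nat.mul_div_cancel' hqd).symm
          rcases Nat.eq_or_lt_of_le (show 1 ≤ n.toNat / n.toNat.minFac from
            Nat.one_le_div_iff hqp.pos |>.mpr (Nat.le_of_dvd (by omega) hqd)) with hs1 | hs2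
          · rw [← hs1, mul_one] at hns
            rw [hns]
            exact hqp
          · exfalso
            have hsd : n.toNat / n.toNat.minFac ∣ n.toNat := Nat.div_dvd_of_dvd hqd
            have hq'p := Nat.minFac_prime (show n.toNat / n.toNat.minFac ≠ 1 by omega)
            have hq'd : (n.toNat / n.toNat.minFac).minFac ∣ n.toNat / n.toNat.minFac :=
              Nat.minFac_dvd _
            have hq'1 : d.toNat ≤ (n.toNat / n.toNat.minFac).minFac :=
              hbound _ hq'p (hq'd.trans hsd)
            have hq's : (n.toNat / n.toNat.minFac).minFac ≤ n.toNat / n.toNat.minFac :=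
              Nat.le_of_dvd (by omega) hq'd
            have : d.toNat * d.toNat ≤ n.toNat.minFac * (n.toNat / n.toNat.minFac) :=
              Nat.mul_le_mul hq1 (le_trans hq'1 hq's)
            omega
        have hgt : ((n, res) : Int × Int).1 > 1 := by
          show n > 1
          omega
        rw [if_pos hgt]
        have hn3 : n.toNat ≠ 2 := fun h => hodd (by omega)
        rw [pvF_prime a _ hprime, Int.toNat_of_nonneg (by omega : (0:Int) ≤ n),
          pvLegendre_eq_euler a n (by omega) hprime]

theorem kronecker_A_eq (a n : Int) (hn : 2 ≤ n.natAbs) :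
    kronecker_symbol a n = (if n < 0 ∧ a < 0 then -1 else 1) * pvF a n.natAbs := by
  have hb0 : (n == 0) = false := by simp; omega
  have hbm1 : (n == -1) = false := by simp; omega
  have hb1 : (n == 1) = false := by simp; omega
  rw [kronecker_symbol]
  simp only [hb0, hbm1, hb1, Bool.false_eq_true, if_false]
  rw [pv_sign_eq n (by omega)]
  by_cases hneg : n < 0
  · rw [if_pos hneg]
    have hmod := PySem.Int.floordiv_mul_add_mod n (-1)
    have hbounds := PySem.Int.mod_neg_bounds (a := n) (show (-1:Int) < 0 by norm_num)
    have hfd : PySem.Int.floordiv n (-1) = -n := by omega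
    rw [hfd]
    have hA1 : kronecker_symbol a (-1) = if a < 0 then -1 else 1 := by
      rw [kronecker_symbol]; norm_num
    rw [hA1]
    have hPdef : ((pvMakeCounter (-n)).items.map (fun pv => pvLegendre a pv.1 ^ pv.2)).prod
        = pvP a (pvMakeCounter (-n)) := rfl
    rw [hPdef, pvMakeCounter_spec (-n) (by omega) a]
    have hNa : (-n).toNat = n.natAbs := by omega
    rw [hNa]
    simp [hneg]
  · rw [if_neg hneg]
    have hfd : PySem.Int.floordiv n 1 = n := by
      rw [PySem.Int.floordiv_eq_ediv_of_pos (by norm_num : (0:Int) < 1), Int.ediv_one]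
    rw [hfd]
    have hA1 : kronecker_symbol a 1 = 1 := by
      rw [kronecker_symbol]; norm_num
    rw [hA1]
    have hPdef : ((pvMakeCounter n).items.map (fun pv => pvLegendre a pv.1 ^ pv.2)).prod
        = pvP a (pvMakeCounter n) := rfl
    rw [hPdef, pvMakeCounter_spec n (by omega) a]
    have hNa : n.toNat = n.natAbs := by omega
    rw [hNa, if_neg (by omega : ¬ (n < 0 ∧ a < 0))]

theorem kronecker_B_eq (a n : Int) (hn : n ≠ 0) :
    kronecker_symbol_alt a n = (if n < 0 ∧ a < 0 then -1 else 1) * pvF a n.natAbs := by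
  have hb0 : (n == 0) = false := by simp; omega
  unfold kronecker_symbol_alt
  simp only [hb0, Bool.false_eq_true, if_false]
  by_cases hneg : n < 0
  · rw [if_pos hneg]
    obtain ⟨v, m, hvm, hmodd, heq⟩ :=
      pvStrip2_spec a (((-n, if a < 0 then (-1:Int) else 1) : Int × Int).1.toNat)
        (-n) (if a < 0 then (-1:Int) else 1) (by omega) (le_refl _)
    have hm0 : 0 < m := by
      rcases Nat.eq_zero_or_pos m with h | h
      · rw [h, mul_zero] at hvm; omega
      · exact h
    rw [heq]
    have hodd := pvOddLoop_spec a (((m : Nat) : Int).toNat + 2) 3 ((m : Nat) : Int)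
      ((if a < 0 then (-1:Int) else 1) * pvLegendre a 2 ^ v)
      (by exact_mod_cast hm0) (by simpa using hmodd) (by norm_num) (by decide)
      (by
        intro q hq hqd
        simp only [Int.toNat_natCast] at hqd
        have h2 := hq.two_le
        have hq2 : q ≠ 2 := fun h => hmodd (h ▸ hqd)
        have h3 : (3:Int).toNat = 3 := rfl
        rw [h3]
        omega)
      (by simp only [Int.toNat_natCast]; omega)
    rw [hodd]
    simp only [Int.toNat_natCast]
    have hNa : (-n).toNat = n.natAbs := by omega
    have hF : pvF a n.natAbs = pvLegendre a 2 ^ v * pvF a m := by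
      rw [← hNa, hvm, pvF_mul a _ _ (by positivity) (by omega), pvF_pow_prime a _ _ Nat.prime_two]
      norm_num
    rw [hF]
    have hsign : (if n < 0 ∧ a < 0 then (-1:Int) else 1) = (if a < 0 then (-1:Int) else 1) := by
      simp [hneg]
    rw [hsign]
    ring
  · rw [if_neg hneg]
    obtain ⟨v, m, hvm, hmodd, heq⟩ :=
      pvStrip2_spec a (((n, (1:Int)) : Int × Int).1.toNat) n 1 (by omega) (le_refl _)
    have hm0 : 0 < m := by
      rcases Nat.eq_zero_or_pos m with h | h
      · rw [h, mul_zero] at hvm; omega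
      · exact h
    rw [heq]
    have hodd := pvOddLoop_spec a (((m : Nat) : Int).toNat + 2) 3 ((m : Nat) : Int)
      ((1:Int) * pvLegendre a 2 ^ v)
      (by exact_mod_cast hm0) (by simpa using hmodd) (by norm_num) (by decide)
      (by
        intro q hq hqd
        simp only [Int.toNat_natCast] at hqd
        have h2 := hq.two_le
        have hq2 : q ≠ 2 := fun h => hmodd (h ▸ hqd)
        have h3 : (3:Int).toNat = 3 := rfl
        rw [h3]
        omega)
      (by simp only [Int.toNat_natCast]; omega)
    rw [hodd]
    simp only [Int.toNat_natCast]
    have hF : pvF a n.toNat = pvLegendre a 2 ^ v * pvF a m := by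
      rw [hvm, pvF_mul a _ _ (by positivity) (by omega), pvF_pow_prime a _ _ Nat.prime_two]
      norm_num
    have hNa : n.toNat = n.natAbs := by omega
    rw [← hNa, hF, if_neg (by omega : ¬ (n < 0 ∧ a < 0))]
    ring

-- ===== VERDICT (by name: the statement is the Claim_ definition above) =====
theorem kronecker_symbol_spec : Claim_equal_kronecker_symbol := by
  intro a n _
  unfold Spec_kronecker_symbol
  by_cases h0 : n = 0
  · subst h0
    rw [kronecker_symbol]
    unfold kronecker_symbol_alt
    norm_num
  · rcases (by omega : n.natAbs = 1 ∨ 2 ≤ n.natAbs) with h1 | h2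
    · have hF1 : pvF a 1 = 1 := by simp [pvF, Nat.primeFactorsList_one]
      rw [kronecker_B_eq a n h0]
      rcases (by omega : n = 1 ∨ n = -1) with rfl | rfl
      · rw [kronecker_symbol]
        norm_num [hF1]
      · rw [kronecker_symbol]
        norm_num [hF1]
    · rw [kronecker_A_eq a n h2, kronecker_B_eq a n (by omega)]
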